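-- pv_equiv track=rewrite | github.com/gonzalopezgil/yugo-scraper | student_rooms/providers/aparto.py | _resolve_city_slug
-- ===== SOURCE A (Python) =====
-- from typing import Any, Dict, List, Optional, Set, Tuple
--
-- CITY_SLUG_MAP: Dict[str, str] = {
--     "Dublin":          "dublin",
--     "Barcelona":       "barcelona",
--     "Milan":           "milan",
--     "Florence":        "florence",
--     "Paris":           "paris",
--     "Aberdeen":        "aberdeen",
--     "Brighton":        "brighton",
--     "Bristol":         "bristol",
--     "Cambridge":       "cambridge",
--     "Glasgow":         "glasgow",
--     "Kingston":        "kingston-london",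
--     "Kingston-London": "kingston-london",
--     "Lancaster":       "lancaster",
--     "Oxford":          "oxford",
--     "Reading":         "reading",
-- }
--
-- def _resolve_city_slug(city: str) -> str:
--     """Resolve URL slug from city name."""
--     slug = CITY_SLUG_MAP.get(city)
--     if slug:
--         return slug
--     city_lower = city.lower()
--     for k, v in CITY_SLUG_MAP.items():
--         if k.lower() == city_lower:
--             return v
--     return city.lower().replace(" ", "-")
-- ===== SOURCE B (Python) =====
-- def _resolve_city_slug(city: str) -> str:
--     """Resolve URL slug from city name.
--
--     Closed form: every slug in the table is just the lowercased city name with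
--     spaces hyphenated, except "Kingston", which maps to "kingston-london" — and
--     that is exactly the fallback rule too, so no table is needed at all.
--     """
--     cl = city.lower()
--     if cl == "kingston":
--         return "kingston-london"
--     return cl.replace(" ", "-")
-- ===== Notes on version B (the rewrite author's own statement) =====
-- stated objective: simpler
-- what changed: The lookup table and the case-insensitive linear scan are removed entirely: every slug in the map equals the lowercased key with spaces hyphenated except 'Kingston', which is also the fallback rule, so B is the closed form 'kingston-london' if city.lower()=='kingston' else city.lower().replace(' ', '-').
import Mathlib
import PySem

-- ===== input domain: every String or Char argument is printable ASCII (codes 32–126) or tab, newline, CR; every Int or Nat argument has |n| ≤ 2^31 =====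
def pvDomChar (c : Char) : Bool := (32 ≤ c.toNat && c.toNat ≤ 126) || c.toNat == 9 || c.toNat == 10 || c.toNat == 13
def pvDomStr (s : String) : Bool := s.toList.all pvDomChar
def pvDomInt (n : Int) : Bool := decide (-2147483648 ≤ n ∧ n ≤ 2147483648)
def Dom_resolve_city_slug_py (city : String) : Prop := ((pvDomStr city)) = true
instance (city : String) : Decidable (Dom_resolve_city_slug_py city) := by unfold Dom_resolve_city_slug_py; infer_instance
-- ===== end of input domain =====

-- B drops the lookup table and the case-insensitive scan entirely: every slug in A's map is the
-- lowercased key with spaces hyphenated except "Kingston" → "kingston-london", which is exactly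
-- A's fallback rule, so B is that closed form (simpler).

-- ===== PORT A =====
def CITY_SLUG_MAP : PySem.Dict String String := PySem.Dict.ofList
  [("Dublin", "dublin"), ("Barcelona", "barcelona"), ("Milan", "milan"),
   ("Florence", "florence"), ("Paris", "paris"), ("Aberdeen", "aberdeen"),
   ("Brighton", "brighton"), ("Bristol", "bristol"), ("Cambridge", "cambridge"),
   ("Glasgow", "glasgow"), ("Kingston", "kingston-london"),
   ("Kingston-London", "kingston-london"), ("Lancaster", "lancaster"),
   ("Oxford", "oxford"), ("Reading", "reading")]

-- 'for k, v in CITY_SLUG_MAP.items(): if k.lower() == city_lower: return v'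
def slugLoop (city_lower : String) : List (String × String) → Option String
  | [] => none
  | (k, v) :: rest =>
    if PySem.Str.lower k = city_lower then some v else slugLoop city_lower rest

-- the code A runs after the first branch falls through ('if slug:' false or key absent):
-- the loop, then 'return city.lower().replace(" ", "-")'
def slugAfter (city : String) : String :=
  let city_lower := PySem.Str.lower city
  (slugLoop city_lower CITY_SLUG_MAP.items).getD (PySem.Str.replace city_lower " " "-")

def resolve_city_slug_py (city : String) : String :=
  match CITY_SLUG_MAP.get? city with
  | some slug => if slug ≠ "" then slug else slugAfter city   -- 'if slug:' truthiness
  | none => slugAfter city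

-- ===== PORT B =====
def resolve_city_slug_py_alt (city : String) : String :=
  let cl := PySem.Str.lower city
  if cl = "kingston" then "kingston-london"
  else PySem.Str.replace cl " " "-"

-- ===== PRECONDITION & SPEC =====
def Spec_resolve_city_slug_py (city : String) (out : String) : Prop := out = resolve_city_slug_py_alt city
instance (city : String) (out : String) : Decidable (Spec_resolve_city_slug_py city out) := by unfold Spec_resolve_city_slug_py; infer_instance

-- ===== CLAIM (what is proved, stated in full; the proofs are below) =====
def Claim_equal_resolve_city_slug_py : Prop := ∀ (city : String), Dom_resolve_city_slug_py city → Spec_resolve_city_slug_py city (resolve_city_slug_py city)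

-- ===== LEMMAS AND PROOFS =====

-- the fall-through part of A (loop + fallback) equals B applied to the already-lowered string:
-- for each lowered key the stored slug is the key itself (spaces hyphenated) except "kingston"
set_option maxHeartbeats 2000000 in
theorem afterLower_eq (cl : String) :
    (slugLoop cl CITY_SLUG_MAP.items).getD (PySem.Str.replace cl " " "-")
      = if cl = "kingston" then "kingston-london" else PySem.Str.replace cl " " "-" := by
  by_cases c1 : cl = "dublin"; · subst c1; decide
  by_cases c2 : cl = "barcelona"; · subst c2; decide
  by_cases c3 : cl = "milan"; · subst c3; decide
  by_cases c4 : cl = "florence"; · subst c4; decide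
  by_cases c5 : cl = "paris"; · subst c5; decide
  by_cases c6 : cl = "aberdeen"; · subst c6; decide
  by_cases c7 : cl = "brighton"; · subst c7; decide
  by_cases c8 : cl = "bristol"; · subst c8; decide
  by_cases c9 : cl = "cambridge"; · subst c9; decide
  by_cases c10 : cl = "glasgow"; · subst c10; decide
  by_cases c11 : cl = "kingston"; · subst c11; decide
  by_cases c12 : cl = "kingston-london"; · subst c12; decide
  by_cases c13 : cl = "lancaster"; · subst c13; decide
  by_cases c14 : cl = "oxford"; · subst c14; decide
  by_cases c15 : cl = "reading"; · subst c15; decide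
  -- cl matches no lowered key: the loop returns none, both sides are the fallback
  have hitems : CITY_SLUG_MAP.items =
    [("Dublin", "dublin"), ("Barcelona", "barcelona"), ("Milan", "milan"),
     ("Florence", "florence"), ("Paris", "paris"), ("Aberdeen", "aberdeen"),
     ("Brighton", "brighton"), ("Bristol", "bristol"), ("Cambridge", "cambridge"),
     ("Glasgow", "glasgow"), ("Kingston", "kingston-london"),
     ("Kingston-London", "kingston-london"), ("Lancaster", "lancaster"),
     ("Oxford", "oxford"), ("Reading", "reading")] := by decide
  have e1 : PySem.Str.lower "Dublin" = "dublin" := by decide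
  have e2 : PySem.Str.lower "Barcelona" = "barcelona" := by decide
  have e3 : PySem.Str.lower "Milan" = "milan" := by decide
  have e4 : PySem.Str.lower "Florence" = "florence" := by decide
  have e5 : PySem.Str.lower "Paris" = "paris" := by decide
  have e6 : PySem.Str.lower "Aberdeen" = "aberdeen" := by decide
  have e7 : PySem.Str.lower "Brighton" = "brighton" := by decide
  have e8 : PySem.Str.lower "Bristol" = "bristol" := by decide
  have e9 : PySem.Str.lower "Cambridge" = "cambridge" := by decide
  have e10 : PySem.Str.lower "Glasgow" = "glasgow" := by decide
  have e11 : PySem.Str.lower "Kingston" = "kingston" := by decide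
  have e12 : PySem.Str.lower "Kingston-London" = "kingston-london" := by decide
  have e13 : PySem.Str.lower "Lancaster" = "lancaster" := by decide
  have e14 : PySem.Str.lower "Oxford" = "oxford" := by decide
  have e15 : PySem.Str.lower "Reading" = "reading" := by decide
  rw [hitems]
  simp only [slugLoop, e1, e2, e3, e4, e5, e6, e7, e8, e9, e10, e11, e12, e13, e14, e15,
    if_neg (Ne.symm c1), if_neg (Ne.symm c2), if_neg (Ne.symm c3), if_neg (Ne.symm c4),
    if_neg (Ne.symm c5), if_neg (Ne.symm c6), if_neg (Ne.symm c7), if_neg (Ne.symm c8),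
    if_neg (Ne.symm c9), if_neg (Ne.symm c10), if_neg (Ne.symm c11), if_neg (Ne.symm c12),
    if_neg (Ne.symm c13), if_neg (Ne.symm c14), if_neg (Ne.symm c15),
    Option.getD_none, if_neg c11]

theorem resolve_eq (city : String) : resolve_city_slug_py city = resolve_city_slug_py_alt city := by
  by_cases h1 : city = "Dublin"; · subst h1; decide
  by_cases h2 : city = "Barcelona"; · subst h2; decide
  by_cases h3 : city = "Milan"; · subst h3; decide
  by_cases h4 : city = "Florence"; · subst h4; decide
  by_cases h5 : city = "Paris"; · subst h5; decide
  by_cases h6 : city = "Aberdeen"; · subst h6; decide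
  by_cases h7 : city = "Brighton"; · subst h7; decide
  by_cases h8 : city = "Bristol"; · subst h8; decide
  by_cases h9 : city = "Cambridge"; · subst h9; decide
  by_cases h10 : city = "Glasgow"; · subst h10; decide
  by_cases h11 : city = "Kingston"; · subst h11; decide
  by_cases h12 : city = "Kingston-London"; · subst h12; decide
  by_cases h13 : city = "Lancaster"; · subst h13; decide
  by_cases h14 : city = "Oxford"; · subst h14; decide
  by_cases h15 : city = "Reading"; · subst h15; decide
  -- city is none of the 15 exact keys: A's first branch misses and A runs slugAfter
  have hget : CITY_SLUG_MAP.get? city = none := by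
    have hitems : CITY_SLUG_MAP = PySem.Dict.mk
      [("Dublin", "dublin"), ("Barcelona", "barcelona"), ("Milan", "milan"),
       ("Florence", "florence"), ("Paris", "paris"), ("Aberdeen", "aberdeen"),
       ("Brighton", "brighton"), ("Bristol", "bristol"), ("Cambridge", "cambridge"),
       ("Glasgow", "glasgow"), ("Kingston", "kingston-london"),
       ("Kingston-London", "kingston-london"), ("Lancaster", "lancaster"),
       ("Oxford", "oxford"), ("Reading", "reading")] := by decide
    rw [hitems]
    simp only [PySem.Dict.get?_mk_cons, beq_iff_eq,
      if_neg (Ne.symm h1), if_neg (Ne.symm h2), if_neg (Ne.symm h3), if_neg (Ne.symm h4),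
      if_neg (Ne.symm h5), if_neg (Ne.symm h6), if_neg (Ne.symm h7), if_neg (Ne.symm h8),
      if_neg (Ne.symm h9), if_neg (Ne.symm h10), if_neg (Ne.symm h11), if_neg (Ne.symm h12),
      if_neg (Ne.symm h13), if_neg (Ne.symm h14), if_neg (Ne.symm h15)]
    rfl
  show resolve_city_slug_py city = resolve_city_slug_py_alt city
  unfold resolve_city_slug_py
  rw [hget]
  unfold slugAfter resolve_city_slug_py_alt
  exact afterLower_eq (PySem.Str.lower city)

-- ===== VERDICT (by name: the statement is the Claim_ definition above) =====
theorem resolve_city_slug_py_spec : Claim_equal_resolve_city_slug_py := by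
  intro city _
  exact resolve_eq city
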